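-- pv_equiv track=rewrite | github.com/cutehammond772/problem-solving-archive | 백준/Platinum/17071. 숨바꼭질 5/숨바꼭질 5.py | destinations
-- ===== SOURCE A (Python) =====
-- INF = 500001
--
-- def destinations(K):
--   idx, time, addition = K, 0, 0
--   result = {}
--
--   while idx + addition < INF:
--     result[idx + addition] = time
--
--     idx += addition
--     addition += 1
--     time += 1
--
--   return time, result
-- ===== SOURCE B (Python) =====
-- def destinations(K):
--   INF = 500001
--   result = {}
--   t = 0
--   while True:
--     pos = K + t * (t + 1) // 2
--     if pos >= INF:
--       return t, result
--     result[pos] = t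
--     t += 1
-- ===== Notes on version B (the rewrite author's own statement) =====
-- stated objective: simpler
-- what changed: B replaces A's three running accumulators (idx, addition, time) with a single counter t and the closed-form position K + t*(t+1)//2 (the t-th triangular offset), so no incremental state is threaded through the loop.
import Mathlib
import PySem

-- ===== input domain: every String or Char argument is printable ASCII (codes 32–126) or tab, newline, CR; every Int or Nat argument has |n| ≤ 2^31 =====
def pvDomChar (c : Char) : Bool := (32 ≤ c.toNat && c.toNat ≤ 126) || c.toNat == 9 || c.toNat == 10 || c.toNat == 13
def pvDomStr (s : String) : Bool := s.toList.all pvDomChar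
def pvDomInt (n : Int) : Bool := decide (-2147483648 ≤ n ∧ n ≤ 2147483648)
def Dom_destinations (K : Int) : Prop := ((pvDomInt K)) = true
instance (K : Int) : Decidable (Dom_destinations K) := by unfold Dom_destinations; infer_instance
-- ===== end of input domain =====

-- B replaces A's three running accumulators (idx, addition, time) with a single counter t and
-- the closed-form position K + t*(t+1)//2; same output, no incremental state.

def pvINF : Int := 500001

-- ===== PORT A =====
-- A's while loop; 'addition'/'time' are the nonnegative counters of the Python loop (kept as Nat,
-- arithmetic identical since they start at 0 and only ever grow by 1).
def destALoop (idx : Int) (addition : Nat) (time : Nat) (result : PySem.Dict Int Int) :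
    Int × (List (Int × Int)) :=
  if idx + (addition : Int) < pvINF then
    destALoop (idx + addition) (addition + 1) (time + 1) (result.insert (idx + addition) (time : Int))
  else ((time : Int), result.items)
termination_by (pvINF - idx - (addition : Int)).toNat
decreasing_by simp only [pvINF] at *; push_cast; omega

def destinations (K : Int) : Int × (List (Int × Int)) :=
  destALoop K 0 0 PySem.Dict.empty

-- ===== PORT B =====
-- t*(t+1)//2 : t ≥ 0, so Python's floor division equals Nat division here (exact: t*(t+1) is even).
def triSucc (t : Nat) : (t + 1) * (t + 2) / 2 = t * (t + 1) / 2 + (t + 1) := by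
  have h2 : (t + 1) * (t + 2) = t * (t + 1) + 2 * (t + 1) := by ring
  omega

def destBLoop (K : Int) (t : Nat) (result : PySem.Dict Int Int) : Int × (List (Int × Int)) :=
  let pos : Int := K + ((t * (t + 1) / 2 : Nat) : Int)
  if pvINF ≤ pos then ((t : Int), result.items)
  else destBLoop K (t + 1) (result.insert pos (t : Int))
termination_by (pvINF - K - ((t * (t + 1) / 2 : Nat) : Int)).toNat
decreasing_by
  have key : (t+1)*(t+1+1)/2 = t*(t+1)/2 + (t+1) := by have := triSucc t; omega
  simp only [pvINF] at *
  omega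

def destinations_alt (K : Int) : Int × (List (Int × Int)) :=
  destBLoop K 0 PySem.Dict.empty

-- ===== PRECONDITION & SPEC =====
def Spec_destinations (K : Int) (out : Int × (List (Int × Int))) : Prop := out = destinations_alt K
instance (K : Int) (out : Int × (List (Int × Int))) : Decidable (Spec_destinations K out) := by unfold Spec_destinations; infer_instance

-- ===== CLAIM (what is proved, stated in full; the proofs are below) =====
def Claim_equal_destinations : Prop := ∀ (K : Int), Dom_destinations K → Spec_destinations K (destinations K)

-- ===== LEMMAS AND PROOFS =====

-- Loop invariant: at iteration t of A, idx + addition = K + t(t+1)/2, addition = time = t.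
lemma dest_loop_eq (K : Int) : ∀ (n t : Nat) (idx : Int) (res : PySem.Dict Int Int),
    (pvINF - idx - (t : Int)).toNat = n →
    idx + (t : Int) = K + ((t * (t + 1) / 2 : Nat) : Int) →
    destALoop idx t t res = destBLoop K t res := by
  intro n
  induction n using Nat.strong_induction_on with
  | _ n ih =>
    intro t idx res hm h
    rw [destALoop, destBLoop.eq_def]
    simp only [← h]
    by_cases hc : idx + (t : Int) < pvINF
    · rw [if_pos hc, if_neg (show ¬ pvINF ≤ idx + (t : Int) by omega)]
      refine ih ((pvINF - (idx + (t : Int)) - ((t + 1 : Nat) : Int)).toNat) ?_ (t + 1) (idx + (t : Int)) _ rfl ?_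
      · simp only [pvINF] at *; omega
      · have key : (t + 1) * (t + 1 + 1) / 2 = t * (t + 1) / 2 + (t + 1) := by
          have := triSucc t; omega
        omega
    · rw [if_neg hc, if_pos (show pvINF ≤ idx + (t : Int) by omega)]

theorem destinations_spec : Claim_equal_destinations := by
  unfold Claim_equal_destinations Spec_destinations destinations destinations_alt
  intro K _
  exact dest_loop_eq K _ 0 K PySem.Dict.empty rfl (by simp)
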